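-- pv_equiv track=rewrite | github.com/opusaha/python-omr-scraper | omr_analyzer.py | _detect_columns_by_clustering
-- ===== SOURCE A (Python) =====
-- from typing import List, Tuple, Dict
--
-- def _detect_columns_by_clustering(x_coords: List[int], width: int) -> List[Tuple[int, int]]:
--     """Detect column boundaries by clustering X coordinates"""
--     if not x_coords:
--         return []
--
--     # Sort X coordinates
--     sorted_x = sorted(set(x_coords))
--
--     # Find gaps to determine column boundaries
--     gaps = []
--     for i in range(1, len(sorted_x)):
--         gap = sorted_x[i] - sorted_x[i-1]
--         if gap > 50:  # Significant gap indicates column separation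
--             gaps.append((sorted_x[i-1], sorted_x[i], gap))
--
--     # Determine number of columns based on gaps
--     if len(gaps) == 0:
--         # Single column
--         return [(0, width)]
--     elif len(gaps) == 1:
--         # Two columns
--         mid_point = (gaps[0][0] + gaps[0][1]) // 2
--         return [(0, mid_point), (mid_point, width)]
--     elif len(gaps) == 2:
--         # Three columns
--         mid1 = (gaps[0][0] + gaps[0][1]) // 2
--         mid2 = (gaps[1][0] + gaps[1][1]) // 2
--         return [(0, mid1), (mid1, mid2), (mid2, width)]
--     else:
--         # Four columns (take largest 3 gaps)
--         gaps.sort(key=lambda g: g[2], reverse=True)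
--         boundaries = []
--         for gap in gaps[:3]:
--             boundaries.append((gap[0] + gap[1]) // 2)
--         boundaries.sort()
--
--         columns = [(0, boundaries[0])]
--         for i in range(1, len(boundaries)):
--             columns.append((boundaries[i-1], boundaries[i]))
--         columns.append((boundaries[-1], width))
--         return columns
-- ===== SOURCE B (Python) =====
-- from typing import List, Tuple
--
-- def _detect_columns_by_clustering(x_coords: List[int], width: int) -> List[Tuple[int, int]]:
--     """Detect column boundaries by clustering X coordinates.
--
--     Streaming version: one pass over the sorted coordinates records each cluster
--     break (gap, midpoint) as it is crossed (duplicates yield gap 0 and are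
--     ignored automatically, so no set() is needed); if more than 3 breaks exist,
--     the weakest break (smallest gap, later position on ties) is deleted
--     repeatedly until 3 remain, which keeps the surviving midpoints in position
--     order without ever sorting; columns are then emitted with a running left edge.
--     """
--     if not x_coords:
--         return []
--     xs = sorted(x_coords)
--     breaks = []  # (gap, midpoint) of each cluster break, in position order
--     prev = xs[0]
--     for x in xs[1:]:
--         if x - prev > 50:
--             breaks.append((x - prev, (prev + x) // 2))
--         prev = x
--     if not breaks:
--         return [(0, width)]
--     while len(breaks) > 3:
--         worst = 0
--         for i in range(1, len(breaks)):
--             if breaks[i][0] <= breaks[worst][0]: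
--                 worst = i
--         breaks.pop(worst)
--     cols = []
--     left = 0
--     for _, m in breaks:
--         cols.append((left, m))
--         left = m
--     cols.append((left, width))
--     return cols
-- ===== Notes on version B (the rewrite author's own statement) =====
-- stated objective: alternative
-- what changed: B streams once over sorted(x_coords) recording each cluster break (gap, midpoint) as it is crossed (duplicates give gap 0, so no set() dedup), then instead of any sorting it repeatedly deletes the weakest break (smallest gap, later one on ties) until at most 3 remain - the surviving midpoints are already in position order - and emits the columns with a running left edge; A builds a gap-triple list from sorted(set()), branches on 0/1/2/>=3 gaps and uses two sorts (gaps by size, then midpoints).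
import Mathlib
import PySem

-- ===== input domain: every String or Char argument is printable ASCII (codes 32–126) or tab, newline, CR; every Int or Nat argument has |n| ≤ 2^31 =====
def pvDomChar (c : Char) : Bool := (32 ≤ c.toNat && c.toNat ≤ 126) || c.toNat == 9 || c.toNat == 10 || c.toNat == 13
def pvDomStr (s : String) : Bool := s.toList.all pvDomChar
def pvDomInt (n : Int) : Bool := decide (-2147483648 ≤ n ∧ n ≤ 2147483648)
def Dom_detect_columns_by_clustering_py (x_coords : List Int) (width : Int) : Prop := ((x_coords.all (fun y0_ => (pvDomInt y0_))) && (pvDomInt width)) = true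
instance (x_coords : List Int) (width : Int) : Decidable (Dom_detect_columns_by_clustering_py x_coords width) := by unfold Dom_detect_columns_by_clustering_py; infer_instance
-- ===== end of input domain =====

-- B replaces A's sorted(set())+gap-triple-list+branch-ladder+two-sorts algorithm by a streaming
-- cluster scan over sorted(x_coords) and repeated deletion of the weakest break (no sorting at
-- all after the coordinate sort); objective: alternative, same asymptotic cost.

-- ===== PORT A =====
def detect_columns_by_clustering_py (x_coords : List Int) (width : Int) : List (Int × Int) :=
  if x_coords = [] then []
  else
    let sorted_x : List Int := PySem.List.sorted (PySem.Set.ofList x_coords) (fun x => x)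
    let gaps : List (Int × Int × Int) :=
      (PySem.List.pyRange 1 (sorted_x.length : Int)).foldl (fun gs i =>
        let gap := PySem.List.pyGetD sorted_x i 0 - PySem.List.pyGetD sorted_x (i - 1) 0
        if gap > 50 then
          gs ++ [(PySem.List.pyGetD sorted_x (i - 1) 0, PySem.List.pyGetD sorted_x i 0, gap)]
        else gs) []
    if gaps.length = 0 then
      [(0, width)]
    else if gaps.length = 1 then
      let g0 := PySem.List.pyGetD gaps 0 (0, 0, 0)
      let mid_point := PySem.Int.floordiv (g0.1 + g0.2.1) 2
      [(0, mid_point), (mid_point, width)]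
    else if gaps.length = 2 then
      let g0 := PySem.List.pyGetD gaps 0 (0, 0, 0)
      let g1 := PySem.List.pyGetD gaps 1 (0, 0, 0)
      let mid1 := PySem.Int.floordiv (g0.1 + g0.2.1) 2
      let mid2 := PySem.Int.floordiv (g1.1 + g1.2.1) 2
      [(0, mid1), (mid1, mid2), (mid2, width)]
    else
      let gaps2 := PySem.List.sorted gaps (fun g => g.2.2) true
      let boundaries := (PySem.List.slice gaps2 none (some 3)).foldl
        (fun bs g => bs ++ [PySem.Int.floordiv (g.1 + g.2.1) 2]) []
      let boundaries2 := PySem.List.sorted boundaries (fun b => b)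
      let columns := [((0 : Int), PySem.List.pyGetD boundaries2 0 0)]
      let columns := (PySem.List.pyRange 1 (boundaries2.length : Int)).foldl
        (fun cs i => cs ++ [(PySem.List.pyGetD boundaries2 (i - 1) 0, PySem.List.pyGetD boundaries2 i 0)]) columns
      columns ++ [(PySem.List.pyGetD boundaries2 (-1) 0, width)]

-- ===== PORT B =====
-- one streaming step of B's cluster scan: state (prev, breaks)
def pvAltStep (st : Int × List (Int × Int)) (x : Int) : Int × List (Int × Int) :=
  (x, if x - st.1 > 50 then st.2 ++ [(x - st.1, PySem.Int.floordiv (st.1 + x) 2)] else st.2)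

-- B's inner scan for the index of the weakest break (last minimum, exactly the Python loop)
def pvWorstIdx (l : List (Int × Int)) : Int :=
  (PySem.List.pyRange 1 (l.length : Int)).foldl
    (fun w i => if (PySem.List.pyGetD l i (0, 0)).1 ≤ (PySem.List.pyGetD l w (0, 0)).1 then i else w) 0

-- breaks.pop(worst)
def pvPopWorst (l : List (Int × Int)) : List (Int × Int) :=
  match PySem.List.pop? l (pvWorstIdx l) with
  | some r => r.2
  | none => l

-- the fold state of pvWorstIdx is always the initial index or a member of the range
lemma pvFoldChoice (f : Int → Int → Int) (hf : ∀ w i, f w i = i ∨ f w i = w) (t : List Int) (w : Int) :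
    t.foldl f w = w ∨ t.foldl f w ∈ t := by
  induction t generalizing w with
  | nil => exact Or.inl rfl
  | cons a t ih =>
    simp only [List.foldl_cons]
    rcases ih (f w a) with h | h
    · rw [h]
      rcases hf w a with h' | h'
      · rw [h']; exact Or.inr List.mem_cons_self
      · rw [h']; exact Or.inl rfl
    · exact Or.inr (List.mem_cons_of_mem _ h)

-- the weakest-break index is in range (termination of the deletion loop)
lemma pvWorstIdx_range (l : List (Int × Int)) (h : l ≠ []) :
    0 ≤ pvWorstIdx l ∧ pvWorstIdx l < (l.length : Int) := by
  unfold pvWorstIdx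
  rcases pvFoldChoice
      (fun w i => if (PySem.List.pyGetD l i (0, 0)).1 ≤ (PySem.List.pyGetD l w (0, 0)).1 then i else w)
      (fun w i => by simp only []; split_ifs <;> simp) (PySem.List.pyRange 1 (l.length : Int)) 0 with hh | hh
  · rw [hh]
    have : 0 < l.length := List.length_pos_iff.mpr h
    constructor
    · omega
    · exact_mod_cast this
  · have := PySem.List.mem_pyRange_one.mp hh
    constructor <;> omega

lemma pvPopWorst_length (l : List (Int × Int)) (h : l ≠ []) :
    (pvPopWorst l).length + 1 = l.length := by
  obtain ⟨h0, h1⟩ := pvWorstIdx_range l h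
  have hn : (pvWorstIdx l).toNat < l.length := by omega
  have hcast : pvWorstIdx l = ((pvWorstIdx l).toNat : Int) := by omega
  unfold pvPopWorst
  rw [hcast, PySem.List.pop?_natCast l _ hn]
  simp [List.length_eraseIdx, hn]
  omega

-- while len(breaks) > 3: delete the weakest break
def pvTrim (l : List (Int × Int)) : List (Int × Int) :=
  if h : 3 < l.length then pvTrim (pvPopWorst l) else l
termination_by l.length
decreasing_by
  have := pvPopWorst_length l (by intro he; rw [he] at h; simp at h)
  omega

def detect_columns_by_clustering_py_alt (x_coords : List Int) (width : Int) : List (Int × Int) :=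
  if x_coords = [] then []
  else
    let xs : List Int := PySem.List.sorted x_coords (fun x => x)
    let breaks : List (Int × Int) :=
      ((PySem.List.slice xs (some 1) none).foldl pvAltStep (PySem.List.pyGetD xs 0 0, [])).2
    if breaks = [] then [(0, width)]
    else
      let kept := pvTrim breaks
      let r := kept.foldl (fun (st : List (Int × Int) × Int) gm => (st.1 ++ [(st.2, gm.2)], gm.2)) ([], 0)
      r.1 ++ [(r.2, width)]

-- ===== PRECONDITION & SPEC =====
def Spec_detect_columns_by_clustering_py (x_coords : List Int) (width : Int) (out : List (Int × Int)) : Prop := out = detect_columns_by_clustering_py_alt x_coords width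
instance (x_coords : List Int) (width : Int) (out : List (Int × Int)) : Decidable (Spec_detect_columns_by_clustering_py x_coords width out) := by unfold Spec_detect_columns_by_clustering_py; infer_instance

-- ===== CLAIM (what is proved, stated in full; the proofs are below) =====
def Claim_equal_detect_columns_by_clustering_py : Prop := ∀ (x_coords : List Int) (width : Int), Dom_detect_columns_by_clustering_py x_coords width → Spec_detect_columns_by_clustering_py x_coords width (detect_columns_by_clustering_py x_coords width)

-- ===== LEMMAS AND PROOFS =====

-- the cluster-break pairs of a list: consecutive pairs more than 50 apart
def pvFpairs (l : List Int) : List (Int × Int) :=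
  (l.zip (l.drop 1)).filter (fun p => decide (p.2 - p.1 > 50))

-- A's gap triple / B's break record of a break pair
def pvTrip (p : Int × Int) : Int × Int × Int := (p.1, p.2, p.2 - p.1)
def pvBrk (p : Int × Int) : Int × Int := (p.2 - p.1, PySem.Int.floordiv (p.1 + p.2) 2)

-- adjacent deduplication (proof device relating sorted(xs) to sorted(set(xs)))
def pvDedupAdj : List Int → List Int
  | [] => []
  | [a] => [a]
  | a :: b :: t => if a = b then pvDedupAdj (b :: t) else a :: pvDedupAdj (b :: t)

lemma pvDedupAdj_cons (t : List Int) (b : Int) : ∃ r, pvDedupAdj (b :: t) = b :: r := by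
  induction t generalizing b with
  | nil => exact ⟨[], rfl⟩
  | cons c t ih =>
    by_cases hbc : b = c
    · obtain ⟨r, hr⟩ := ih c
      exact ⟨r, by simp [pvDedupAdj, hbc, hr]⟩
    · exact ⟨pvDedupAdj (c :: t), by simp [pvDedupAdj, hbc]⟩

lemma pvMem_dedupAdj (l : List Int) (x : Int) : x ∈ pvDedupAdj l ↔ x ∈ l := by
  induction l with
  | nil => simp [pvDedupAdj]
  | cons a l ih =>
    cases l with
    | nil => simp [pvDedupAdj]
    | cons b t =>
      by_cases hab : a = b
      · subst hab
        simp [pvDedupAdj, ih]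
      · simp [pvDedupAdj, hab, ih]

lemma pvDedupAdj_pairwise_lt (l : List Int) (h : l.Pairwise (· ≤ ·)) :
    (pvDedupAdj l).Pairwise (· < ·) := by
  induction l with
  | nil => simp [pvDedupAdj]
  | cons a l ih =>
    cases l with
    | nil => simp [pvDedupAdj]
    | cons b t =>
      have h' : (b :: t).Pairwise (· ≤ ·) := h.of_cons
      by_cases hab : a = b
      · simpa [pvDedupAdj, hab] using ih h'
      · rw [show pvDedupAdj (a :: b :: t) = a :: pvDedupAdj (b :: t) by simp [pvDedupAdj, hab]]
        refine List.Pairwise.cons ?_ (ih h')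
        intro x hx
        have hx' : x ∈ b :: t := (pvMem_dedupAdj _ _).mp hx
        have hab' : a ≤ b := (List.pairwise_cons.mp h).1 b List.mem_cons_self
        rcases List.mem_cons.mp hx' with rfl | hxt
        · omega
        · have : b ≤ x := (List.pairwise_cons.mp h').1 x hxt
          omega

lemma pvFpairs_dedupAdj (l : List Int) : pvFpairs l = pvFpairs (pvDedupAdj l) := by
  induction l with
  | nil => simp [pvDedupAdj]
  | cons a l ih =>
    cases l with
    | nil => simp [pvDedupAdj]
    | cons b t =>
      have hstep : pvFpairs (a :: b :: t) =
          (if b - a > 50 then [(a, b)] else []) ++ pvFpairs (b :: t) := by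
        simp [pvFpairs, List.zip]
        split_ifs with hc <;> simp [hc]
      by_cases hab : a = b
      · subst hab
        rw [show pvDedupAdj (a :: a :: t) = pvDedupAdj (a :: t) by simp [pvDedupAdj]]
        rw [hstep, if_neg (by omega), List.nil_append]
        exact ih
      · obtain ⟨r, hr⟩ := pvDedupAdj_cons t b
        have hstep2 : pvFpairs (a :: b :: r) =
            (if b - a > 50 then [(a, b)] else []) ++ pvFpairs (b :: r) := by
          simp [pvFpairs, List.zip]
          split_ifs with hc <;> simp [hc]
        rw [show pvDedupAdj (a :: b :: t) = a :: pvDedupAdj (b :: t) by simp [pvDedupAdj, hab]]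
        rw [hr, hstep, hstep2, ih, hr]

lemma pvSortedSet_eq_dedupAdj (x : List Int) :
    PySem.List.sorted (PySem.Set.ofList x) (fun v => v) = pvDedupAdj (PySem.List.sorted x (fun v => v)) := by
  have hle : (PySem.List.sorted x (fun v => v)).Pairwise (· ≤ ·) := by
    simpa using PySem.List.sorted_pairwise x (fun v => v)
  have hlt : (pvDedupAdj (PySem.List.sorted x (fun v => v))).Pairwise (· < ·) :=
    pvDedupAdj_pairwise_lt _ hle
  have hnd1 : (pvDedupAdj (PySem.List.sorted x (fun v => v))).Nodup :=
    hlt.imp (fun h => ne_of_lt h)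
  have hperm : (pvDedupAdj (PySem.List.sorted x (fun v => v))).Perm (PySem.Set.ofList x) := by
    rw [List.perm_ext_iff_of_nodup hnd1 (PySem.Set.nodup_ofList x)]
    intro a
    rw [pvMem_dedupAdj, PySem.List.mem_sorted, PySem.Set.mem_ofList]
  exact PySem.List.sorted_eq_of_perm_of_pairwise_lt _ _ _ hperm hlt

-- B's streaming scan computes exactly the break records of the scanned list
lemma pvAltScan_eq (t : List Int) (prev : Int) (acc : List (Int × Int)) :
    (t.foldl pvAltStep (prev, acc)).2 = acc ++ (pvFpairs (prev :: t)).map pvBrk := by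
  induction t generalizing prev acc with
  | nil => simp [pvFpairs]
  | cons x t ih =>
    have hstep : pvFpairs (prev :: x :: t) =
        (if x - prev > 50 then [(prev, x)] else []) ++ pvFpairs (x :: t) := by
      simp [pvFpairs, List.zip]
      split_ifs with hc <;> simp [hc]
    simp only [List.foldl_cons]
    rw [show pvAltStep (prev, acc) x =
        (x, acc ++ if x - prev > 50 then [(x - prev, PySem.Int.floordiv (prev + x) 2)] else []) by
      simp [pvAltStep]; split_ifs <;> simp]
    rw [ih, hstep, List.map_append, List.append_assoc]
    congr 1
    split_ifs <;> simp [pvBrk]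

-- range/index helpers (shared with the A-side foldl translations)
lemma pyRange_one_len (n : Nat) :
    PySem.List.pyRange 1 ((n : Nat) : Int) = (List.range (n - 1)).map (fun k : Nat => ((k : Int) + 1)) := by
  induction n with
  | zero => decide
  | succ m ih =>
    cases m with
    | zero => decide
    | succ m' =>
      have h1 : (1 : Int) ≤ ((m' + 1 : Nat) : Int) := by push_cast; omega
      have h2 : ((m' + 1 + 1 : Nat) : Int) = ((m' + 1 : Nat) : Int) + 1 := by push_cast; ring
      have h3 : (m' + 1 + 1) - 1 = (m' + 1 - 1) + 1 := by omega
      rw [h2, PySem.List.pyRange_one_succ_right h1, ih, h3, List.range_succ, List.map_append]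
      simp

lemma zipPairs_eq (s : List Int) :
    (List.range (s.length - 1)).map (fun j => (s.getD j 0, s.getD (j + 1) 0)) = s.zip (s.drop 1) := by
  induction s with
  | nil => simp
  | cons a t ih =>
    cases t with
    | nil => simp
    | cons b u =>
      have hlen : (a :: b :: u).length - 1 = ((b :: u).length - 1) + 1 := by simp
      rw [hlen, List.range_succ_eq_map, List.map_cons, List.map_map]
      have hz : ((a :: b :: u).zip ((a :: b :: u).drop 1)) = (a, b) :: ((b :: u).zip ((b :: u).drop 1)) := by
        simp [List.zip]
      rw [hz, ← ih]
      simp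

-- A's gap foldl equals the break pairs of the sorted deduplicated list, as triples
lemma gaps_eq (s : List Int) :
    (PySem.List.pyRange 1 (s.length : Int)).foldl (fun gs i =>
        let gap := PySem.List.pyGetD s i 0 - PySem.List.pyGetD s (i - 1) 0
        if gap > 50 then
          gs ++ [(PySem.List.pyGetD s (i - 1) 0, PySem.List.pyGetD s i 0, gap)]
        else gs) [] = (pvFpairs s).map pvTrip := by
  have hbody : (fun (gs : List (Int × Int × Int)) (i : Int) =>
        let gap := PySem.List.pyGetD s i 0 - PySem.List.pyGetD s (i - 1) 0
        if gap > 50 then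
          gs ++ [(PySem.List.pyGetD s (i - 1) 0, PySem.List.pyGetD s i 0, gap)]
        else gs) =
      (fun gs i =>
        if (fun i => decide (PySem.List.pyGetD s i 0 - PySem.List.pyGetD s (i - 1) 0 > 50)) i = true then
          gs ++ [(fun i => (PySem.List.pyGetD s (i - 1) 0, PySem.List.pyGetD s i 0,
              PySem.List.pyGetD s i 0 - PySem.List.pyGetD s (i - 1) 0)) i]
        else gs) := by
    funext gs i
    simp
  have key1 : ∀ j : Nat, PySem.List.pyGetD s ((j : Int) + 1) 0 = s.getD (j + 1) 0 := by
    intro j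
    have e2 : ((j : Int) + 1) = (((j + 1 : Nat)) : Int) := by push_cast; ring
    rw [e2, PySem.List.pyGetD_natCast]
  unfold pvFpairs
  rw [hbody, PySem.List.foldl_append_if, List.nil_append, pyRange_one_len, List.filter_map,
    List.map_map, ← zipPairs_eq, List.filter_map, List.map_map]
  have hfil : List.filter ((fun i => decide (PySem.List.pyGetD s i 0 - PySem.List.pyGetD s (i - 1) 0 > 50)) ∘ (fun k : Nat => ((k : Int) + 1))) (List.range (s.length - 1)) =
      List.filter ((fun p : Int × Int => decide (p.2 - p.1 > 50)) ∘ (fun j => (s.getD j 0, s.getD (j + 1) 0))) (List.range (s.length - 1)) := by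
    apply List.filter_congr
    intro j _
    simp [Function.comp, key1 j]
  rw [hfil]
  apply List.map_congr_left
  intro j _
  simp [Function.comp, key1 j, pvTrip]

lemma zip_pairs_pairwise (s : List Int) (h : s.Pairwise (· < ·)) :
    (s.zip (s.drop 1)).Pairwise (fun p q : Int × Int => p.2 ≤ q.1) := by
  induction s with
  | nil => simp
  | cons a t ih =>
    cases t with
    | nil => simp
    | cons b u =>
      have h' : (b :: u).Pairwise (· < ·) := h.of_cons
      have hz : ((a :: b :: u).zip ((a :: b :: u).drop 1)) = (a, b) :: ((b :: u).zip ((b :: u).drop 1)) := by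
        simp [List.zip]
      rw [hz]
      refine List.Pairwise.cons ?_ (ih h')
      intro q hq
      show b ≤ q.1
      have hq1 : q.1 ∈ b :: u := (List.of_mem_zip hq).1
      rcases List.mem_cons.mp hq1 with h1 | h1
      · simp [h1]
      · exact le_of_lt ((List.pairwise_cons.mp h').1 q.1 h1)

-- structure of the break-pair list over a strictly increasing base list
lemma pvFpairs_props (s : List Int) (h : s.Pairwise (· < ·)) :
    (pvFpairs s).Pairwise (fun p q => p.2 ≤ q.1) ∧ ∀ p ∈ pvFpairs s, p.1 + 50 < p.2 := by
  constructor
  · exact (zip_pairs_pairwise s h).filter _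
  · intro p hp
    have hp' := (List.mem_filter.mp hp).2
    simp at hp'
    omega

-- midpoints of the break list are strictly increasing
lemma pvMids_pairwise (G : List (Int × Int))
    (hp : G.Pairwise (fun p q => p.2 ≤ q.1)) (hmem : ∀ p ∈ G, p.1 + 50 < p.2) :
    ((G.map pvBrk).map (·.2)).Pairwise (· < ·) := by
  rw [List.map_map, List.pairwise_map]
  refine hp.imp_of_mem ?_
  intro p q hpm hqm hle
  have h1 := hmem p hpm
  have h2 := hmem q hqm
  have hb1 : PySem.Int.floordiv (p.1 + p.2) 2 < p.2 := by
    rw [PySem.Int.floordiv_lt_iff_lt_mul (by omega)]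
    omega
  have hb2 := (PySem.Int.floordiv_two_mid_bounds (show q.1 ≤ q.2 by omega)).1
  show (pvBrk p).2 < (pvBrk q).2
  simp only [pvBrk]
  omega

-- ---- stable reverse sort: removing the last minimum removes the last sorted element ----

lemma pvInsertBy_nil {α : Type} (bf : α → α → Bool) (x : α) :
    PySem.List.insertBy bf x [] = [x] := by
  rfl

lemma pvInsertBy_cons {α : Type} (bf : α → α → Bool) (x y : α) (ys : List α) :
    PySem.List.insertBy bf x (y :: ys) = if bf x y then x :: y :: ys else y :: PySem.List.insertBy bf x ys := by
  rfl

lemma pvInsertBy_append_last (bf : (Int × Int) → (Int × Int) → Bool) (x m : Int × Int)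
    (ys : List (Int × Int)) (h : bf x m = true) :
    PySem.List.insertBy bf x (ys ++ [m]) = PySem.List.insertBy bf x ys ++ [m] := by
  induction ys with
  | nil => simp [pvInsertBy_cons, pvInsertBy_nil, h]
  | cons y ys ih =>
    rw [List.cons_append, pvInsertBy_cons, pvInsertBy_cons]
    split_ifs <;> simp [ih]

lemma pvFoldIns_append_last (key : (Int × Int) → Int) (m : Int × Int) (v : List (Int × Int))
    (hv : ∀ z ∈ v, key m < key z) (acc : List (Int × Int)) :
    v.foldl (fun acc x => PySem.List.insertBy (fun a b => decide (key b < key a)) x acc) (acc ++ [m]) =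
      v.foldl (fun acc x => PySem.List.insertBy (fun a b => decide (key b < key a)) x acc) acc ++ [m] := by
  induction v generalizing acc with
  | nil => rfl
  | cons z v ih =>
    simp only [List.foldl_cons]
    rw [pvInsertBy_append_last _ _ _ _ (by simpa using hv z List.mem_cons_self)]
    exact ih (fun z hz => hv z (List.mem_cons_of_mem _ hz)) _

lemma pvSortedRev_split (key : (Int × Int) → Int) (u v : List (Int × Int)) (m : Int × Int)
    (hu : ∀ y ∈ u, key m ≤ key y) (hv : ∀ z ∈ v, key m < key z) :
    PySem.List.sorted (u ++ m :: v) key true = PySem.List.sorted (u ++ v) key true ++ [m] := by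
  rw [PySem.List.sorted_rev_eq_foldl_insertBy, PySem.List.sorted_rev_eq_foldl_insertBy,
    List.foldl_append, List.foldl_append, List.foldl_cons]
  rw [PySem.List.insertBy_of_forall_not_before _ m _ (by
    intro y hy
    have hy' : y ∈ u := by
      have := (PySem.List.sorted_rev_eq_foldl_insertBy u key).symm
      rw [this] at hy
      exact (PySem.List.mem_sorted _ _ _ _).mp hy
    simpa using not_lt.mpr (hu y hy'))]
  exact pvFoldIns_append_last key m v hv _

-- ---- the weakest-break scan finds the LAST minimum ----

lemma pvGfold_cast (l : List (Int × Int)) (r : Nat) (wN : Nat) :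
    ((List.range r).foldl (fun (w : Int) (k : Nat) =>
        if (PySem.List.pyGetD l ((k : Int) + 1) (0, 0)).1 ≤ (PySem.List.pyGetD l w (0, 0)).1
        then (k : Int) + 1 else w) (wN : Int)) =
      (((List.range r).foldl (fun (w k : Nat) =>
        if (l.getD (k + 1) (0, 0)).1 ≤ (l.getD w (0, 0)).1 then k + 1 else w) wN : Nat) : Int) := by
  induction r generalizing wN with
  | zero => rfl
  | succ r ih =>
    rw [List.range_succ, List.foldl_append, List.foldl_append, List.foldl_cons, List.foldl_cons,
      List.foldl_nil, List.foldl_nil, ih]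
    set w' : Nat := (List.range r).foldl (fun (w k : Nat) =>
      if (l.getD (k + 1) (0, 0)).1 ≤ (l.getD w (0, 0)).1 then k + 1 else w) wN
    have e1 : ((r : Int) + 1) = (((r + 1 : Nat)) : Int) := by push_cast; ring
    rw [e1, PySem.List.pyGetD_natCast, PySem.List.pyGetD_natCast]
    split_ifs <;> simp

lemma pvGinv (l : List (Int × Int)) (r : Nat) (hr : r < l.length) :
    ((List.range r).foldl (fun (w k : Nat) =>
        if (l.getD (k + 1) (0, 0)).1 ≤ (l.getD w (0, 0)).1 then k + 1 else w) 0) ≤ r ∧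
    (∀ j, j < ((List.range r).foldl (fun (w k : Nat) =>
        if (l.getD (k + 1) (0, 0)).1 ≤ (l.getD w (0, 0)).1 then k + 1 else w) 0) →
      (l.getD ((List.range r).foldl (fun (w k : Nat) =>
        if (l.getD (k + 1) (0, 0)).1 ≤ (l.getD w (0, 0)).1 then k + 1 else w) 0) (0, 0)).1 ≤ (l.getD j (0, 0)).1) ∧
    (∀ j, ((List.range r).foldl (fun (w k : Nat) =>
        if (l.getD (k + 1) (0, 0)).1 ≤ (l.getD w (0, 0)).1 then k + 1 else w) 0) < j → j ≤ r →
      (l.getD ((List.range r).foldl (fun (w k : Nat) =>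
        if (l.getD (k + 1) (0, 0)).1 ≤ (l.getD w (0, 0)).1 then k + 1 else w) 0) (0, 0)).1 < (l.getD j (0, 0)).1) := by
  induction r with
  | zero =>
    simp only [List.range_zero, List.foldl_nil]
    exact ⟨le_refl _, fun j hj => absurd hj (by omega), fun j h1 h2 => absurd h2 (by omega)⟩
  | succ r ih =>
    obtain ⟨hle, h1, h2⟩ := ih (by omega)
    rw [List.range_succ, List.foldl_append, List.foldl_cons, List.foldl_nil]
    set w : Nat := (List.range r).foldl (fun (w k : Nat) =>
      if (l.getD (k + 1) (0, 0)).1 ≤ (l.getD w (0, 0)).1 then k + 1 else w) 0 with hw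
    by_cases hc : (l.getD (r + 1) (0, 0)).1 ≤ (l.getD w (0, 0)).1
    · rw [if_pos hc]
      refine ⟨le_refl _, ?_, fun j hj1 hj2 => absurd (lt_of_lt_of_le hj1 hj2) (lt_irrefl _)⟩
      intro j hj
      rcases lt_trichotomy j w with hjw | rfl | hjw
      · exact le_trans hc (h1 j hjw)
      · exact hc
      · exact le_of_lt (lt_of_le_of_lt hc (h2 j hjw (by omega)))
    · rw [if_neg hc]
      refine ⟨by omega, h1, ?_⟩
      intro j hj1 hj2
      rcases Nat.lt_succ_iff_lt_or_eq.mp (Nat.lt_succ_of_le hj2) with h | rfl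
      · exact h2 j hj1 (by omega)
      · exact lt_of_not_ge hc

lemma pvWorstIdx_spec (l : List (Int × Int)) (h : l ≠ []) :
    ∃ wN : Nat, ∃ hw : wN < l.length, pvWorstIdx l = (wN : Int) ∧
      (∀ j, (hj : j < wN) → (l[wN]).1 ≤ (l[j]'(by omega)).1) ∧
      (∀ j, (hj : j < l.length) → wN < j → (l[wN]).1 < (l[j]'hj).1) := by
  have hfold := pvGfold_cast l (l.length - 1) 0
  have hinv := pvGinv l (l.length - 1) (by
    have : 0 < l.length := List.length_pos_iff.mpr h
    omega)
  set wN := (List.range (l.length - 1)).foldl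
      (fun (w k : Nat) => if (l.getD (k + 1) (0, 0)).1 ≤ (l.getD w (0, 0)).1 then k + 1 else w) 0 with hwN
  obtain ⟨hle, h1, h2⟩ := hinv
  have hwlt : wN < l.length := by
    have : 0 < l.length := List.length_pos_iff.mpr h
    omega
  refine ⟨wN, hwlt, ?_, ?_, ?_⟩
  · unfold pvWorstIdx
    rw [show (l.length : Int) = ((l.length : Nat) : Int) from rfl, pyRange_one_len, List.foldl_map]
    rw [show (0 : Int) = ((0 : Nat) : Int) from rfl]
    exact hfold
  · intro j hj
    have := h1 j hj
    rwa [List.getD_eq_getElem _ _ hwlt, List.getD_eq_getElem _ _ (by omega)] at this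
  · intro j hj hwj
    have := h2 j hwj (by omega)
    rwa [List.getD_eq_getElem _ _ hwlt, List.getD_eq_getElem _ _ hj] at this

lemma pvPopWorst_split (l : List (Int × Int)) (h : l ≠ []) :
    ∃ wN : Nat, ∃ hw : wN < l.length,
      l = l.take wN ++ l[wN] :: l.drop (wN + 1) ∧
      pvPopWorst l = l.take wN ++ l.drop (wN + 1) ∧
      (∀ y ∈ l.take wN, (l[wN]).1 ≤ y.1) ∧
      (∀ z ∈ l.drop (wN + 1), (l[wN]).1 < z.1) := by
  obtain ⟨wN, hw, heq, h1, h2⟩ := pvWorstIdx_spec l h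
  refine ⟨wN, hw, ?_, ?_, ?_, ?_⟩
  · conv_lhs => rw [← List.take_append_drop wN l]
    rw [List.drop_eq_getElem_cons hw]
  · unfold pvPopWorst
    rw [heq, PySem.List.pop?_natCast l wN hw]
    simp [List.eraseIdx_eq_take_drop_succ]
  · intro y hy
    obtain ⟨j, hj, rfl⟩ := List.mem_iff_getElem.mp hy
    have hjw : j < wN := by
      have := hj; rw [List.length_take] at this; omega
    rw [List.getElem_take]
    exact h1 j hjw
  · intro z hz
    obtain ⟨j, hj, rfl⟩ := List.mem_iff_getElem.mp hz
    have hlen : wN + 1 + j < l.length := by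
      have := hj; rw [List.length_drop] at this; omega
    rw [List.getElem_drop]
    exact h2 (wN + 1 + j) hlen (by omega)

lemma pvSortedRev_popWorst (l : List (Int × Int)) (h : l ≠ []) :
    ∃ m, PySem.List.sorted l (·.1) true = PySem.List.sorted (pvPopWorst l) (·.1) true ++ [m] := by
  obtain ⟨wN, hw, hdec, hpop, h1, h2⟩ := pvPopWorst_split l h
  refine ⟨l[wN], ?_⟩
  conv_lhs => rw [hdec]
  rw [hpop]
  exact pvSortedRev_split _ _ _ _ h1 (fun z hz => h2 z hz)

lemma pvTrim_sorted (l : List (Int × Int)) :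
    PySem.List.sorted (pvTrim l) (·.1) true = (PySem.List.sorted l (·.1) true).take 3 := by
  induction l using pvTrim.induct with
  | case1 l h ih =>
    have hne : l ≠ [] := by intro he; rw [he] at h; simp at h
    have hlen := pvPopWorst_length l hne
    rw [pvTrim, dif_pos h, ih]
    obtain ⟨m, hm⟩ := pvSortedRev_popWorst l hne
    rw [hm, List.take_append_of_le_length (by rw [PySem.List.length_sorted]; omega)]
  | case2 l h =>
    rw [pvTrim, dif_neg h]
    exact (List.take_of_length_le (by rw [PySem.List.length_sorted]; omega)).symm

lemma pvTrim_sublist (l : List (Int × Int)) : List.Sublist (pvTrim l) l := by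
  induction l using pvTrim.induct with
  | case1 l h ih =>
    have hne : l ≠ [] := by intro he; rw [he] at h; simp at h
    obtain ⟨wN, hw, hdec, hpop, h1, h2⟩ := pvPopWorst_split l hne
    rw [pvTrim, dif_pos h]
    refine ih.trans ?_
    rw [hpop, ← List.eraseIdx_eq_take_drop_succ]
    exact List.eraseIdx_sublist l wN
  | case2 l h =>
    rw [pvTrim, dif_neg h]

lemma pvTrim_length (l : List (Int × Int)) (h : 3 ≤ l.length) : (pvTrim l).length = 3 := by
  have h1 : (pvTrim l).length = (PySem.List.sorted (pvTrim l) (·.1) true).length :=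
    (PySem.List.length_sorted _ _ _).symm
  rw [h1, pvTrim_sorted, List.length_take, PySem.List.length_sorted]
  omega

-- ---- sorting a mapped list by a key that factors through the map ----

lemma pvInsertBy_map {α β : Type} (φ : α → β) (k : β → Int)
    (x : α) (ys : List α) :
    PySem.List.insertBy (fun a b => decide (k b < k a)) (φ x) (ys.map φ) =
      (PySem.List.insertBy (fun a b => decide (k (φ b) < k (φ a))) x ys).map φ := by
  induction ys with
  | nil => rfl
  | cons y ys ih =>
    rw [List.map_cons]
    rw [pvInsertBy_cons (fun a b => decide (k b < k a)) (φ x) (φ y) (ys.map φ),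
      pvInsertBy_cons (fun a b => decide (k (φ b) < k (φ a))) x y ys]
    split_ifs <;> simp [ih]

lemma pvSortedRev_map {α β : Type} (φ : α → β) (k : β → Int)
    (l : List α) :
    PySem.List.sorted (l.map φ) k true = (PySem.List.sorted l (fun p => k (φ p)) true).map φ := by
  rw [PySem.List.sorted_rev_eq_foldl_insertBy, PySem.List.sorted_rev_eq_foldl_insertBy,
    List.foldl_map]
  suffices haux : ∀ (t acc : List α),
      t.foldl (fun acc x => PySem.List.insertBy (fun a b => decide (k b < k a)) (φ x) acc) (acc.map φ) =
        (t.foldl (fun acc x => PySem.List.insertBy (fun a b => decide (k (φ b) < k (φ a))) x acc) acc).map φ by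
    simpa using haux l []
  intro t
  induction t with
  | nil => intro acc; rfl
  | cons x t ih =>
    intro acc
    simp only [List.foldl_cons]
    rw [pvInsertBy_map, ih]

-- B's column-assembly fold pairs a running left edge with each midpoint
lemma pvCols_eq (l : List (Int × Int)) (acc : List (Int × Int)) (left w : Int) :
    (l.foldl (fun (st : List (Int × Int) × Int) gm => (st.1 ++ [(st.2, gm.2)], gm.2)) (acc, left)).1 ++
        [((l.foldl (fun (st : List (Int × Int) × Int) gm => (st.1 ++ [(st.2, gm.2)], gm.2)) (acc, left)).2, w)] =
      acc ++ ((left :: l.map (·.2)).zip (l.map (·.2) ++ [w])) := by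
  induction l generalizing acc left with
  | nil => simp
  | cons gm l ih =>
    simp only [List.foldl_cons, List.map_cons]
    rw [ih]
    simp [List.zip, List.append_assoc]

-- the four-column assembly of A on a three-element boundary list equals the running-edge pairing
lemma assembleA (c0 c1 c2 w : Int) :
    ([((0 : Int), PySem.List.pyGetD [c0, c1, c2] 0 0)] ++
      List.map (fun i => (PySem.List.pyGetD [c0, c1, c2] (i - 1) 0, PySem.List.pyGetD [c0, c1, c2] i 0))
        (PySem.List.pyRange 1 (([c0, c1, c2] : List Int).length : Int))) ++
      [(PySem.List.pyGetD [c0, c1, c2] (-1) 0, w)] =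
    (((0 : Int) :: [c0, c1, c2]).zip ([c0, c1, c2] ++ [w])) := by
  have hr : PySem.List.pyRange 1 (([c0, c1, c2] : List Int).length : Int) = [1, 2] := by
    have h3 : (([c0, c1, c2] : List Int).length : Int) = 3 := by simp
    rw [h3]; decide
  rw [hr]
  simp [PySem.List.pyGetD, PySem.List.pyIdx?, PySem.List.pyGet?, List.zip]

-- ===== VERDICT (by name: the statement is the Claim_ definition above) =====
theorem detect_columns_by_clustering_py_spec : Claim_equal_detect_columns_by_clustering_py := by
  intro x w _
  unfold Spec_detect_columns_by_clustering_py detect_columns_by_clustering_py detect_columns_by_clustering_py_alt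
  by_cases hx : x = []
  · simp [hx]
  · simp only [if_neg hx]
    have hxs : PySem.List.sorted x (fun v => v) ≠ [] := by
      rw [Ne, PySem.List.sorted_eq_nil_iff]; exact hx
    obtain ⟨h0, t0, hht⟩ : ∃ h0 t0, PySem.List.sorted x (fun v => v) = h0 :: t0 := by
      cases hE : PySem.List.sorted x (fun v => v) with
      | nil => exact absurd hE hxs
      | cons a b => exact ⟨a, b, rfl⟩
    rw [gaps_eq, hht]
    rw [show PySem.List.slice (h0 :: t0) (some 1) none = t0 by
      rw [PySem.List.slice_from _ (by norm_num)]; norm_num]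
    rw [PySem.List.pyGetD_zero_cons, pvAltScan_eq t0 h0 [], List.nil_append, ← hht]
    have hFs : pvFpairs (PySem.List.sorted x (fun v => v)) =
        pvFpairs (PySem.List.sorted (PySem.Set.ofList x) (fun v => v)) := by
      rw [pvSortedSet_eq_dedupAdj]
      exact pvFpairs_dedupAdj _
    rw [hFs]
    have hlt : (PySem.List.sorted (PySem.Set.ofList x) (fun v => v)).Pairwise (· < ·) :=
      PySem.List.sorted_ofList_pairwise_lt x
    obtain ⟨hGp, hGm⟩ := pvFpairs_props _ hlt
    have hmids := pvMids_pairwise _ hGp hGm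
    generalize hGG : pvFpairs (PySem.List.sorted (PySem.Set.ofList x) (fun v => v)) = G at hGp hGm hmids ⊢
    rcases G with _ | ⟨p, _ | ⟨q, _ | ⟨r3, rest⟩⟩⟩
    · simp
    · -- one break: two columns
      rw [if_neg (by simp), pvTrim, dif_neg (by simp)]
      simp only [List.map_cons, List.map_nil, List.length_cons, List.length_nil]
      norm_num [PySem.List.pyGetD_ofNat']
      simp [pvTrip, pvBrk]
    · -- two breaks: three columns
      rw [if_neg (by simp), pvTrim, dif_neg (by simp)]
      simp only [List.map_cons, List.map_nil, List.length_cons, List.length_nil]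
      norm_num [PySem.List.pyGetD_ofNat']
      simp [pvTrip, pvBrk]
    · -- at least three breaks
      rw [if_neg (by simp), if_neg (by simp),
        if_neg (by simp), if_neg (by simp)]
      rw [PySem.List.foldl_append_singleton_eq_map, PySem.List.foldl_append_singleton_eq_map]
      simp only [List.nil_append]
      set G := p :: q :: r3 :: rest with hGdef
      have hA : PySem.List.sorted (G.map pvTrip) (fun g => g.2.2) true
          = (PySem.List.sorted G (fun pq => pq.2 - pq.1) true).map pvTrip := by
        have := pvSortedRev_map pvTrip (fun g => g.2.2) G
        simpa [pvTrip] using this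
      have hB : PySem.List.sorted (G.map pvBrk) (fun b => b.1) true
          = (PySem.List.sorted G (fun pq => pq.2 - pq.1) true).map pvBrk := by
        have := pvSortedRev_map pvBrk (fun b => b.1) G
        simpa [pvBrk] using this
      set S := PySem.List.sorted G (fun pq => pq.2 - pq.1) true with hS
      have hslice : PySem.List.slice (PySem.List.sorted (G.map pvTrip) (fun g => g.2.2) true) none (some 3)
          = (S.take 3).map pvTrip := by
        rw [PySem.List.slice_to _ (by norm_num)]
        rw [show Int.toNat 3 = 3 from rfl, hA, ← List.map_take]
      rw [hslice]
      have hbd : ((S.take 3).map pvTrip).map (fun g => PySem.Int.floordiv (g.1 + g.2.1) 2)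
          = ((S.take 3).map pvBrk).map (fun b => b.2) := by
        simp only [List.map_map]
        exact List.map_congr_left (fun a _ => by simp [pvTrip, pvBrk])
      rw [hbd]
      have hkept : PySem.List.sorted (pvTrim (G.map pvBrk)) (fun b => b.1) true
          = (S.take 3).map pvBrk := by
        have := pvTrim_sorted (G.map pvBrk)
        rw [this, hB, ← List.map_take]
      have hperm : ((pvTrim (G.map pvBrk)).map (fun b => b.2)).Perm
          (((S.take 3).map pvBrk).map (fun b => b.2)) := by
        refine List.Perm.map _ ?_
        rw [← hkept]
        exact (PySem.List.sorted_perm _ _ _).symm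
      have hmlt : ((pvTrim (G.map pvBrk)).map (fun b => b.2)).Pairwise (· < ·) :=
        List.Pairwise.sublist (List.Sublist.map _ (pvTrim_sublist _)) hmids
      have hbd2 : PySem.List.sorted (((S.take 3).map pvBrk).map (fun b => b.2)) (fun b => b)
          = (pvTrim (G.map pvBrk)).map (fun b => b.2) :=
        PySem.List.sorted_eq_of_perm_of_pairwise_lt _ _ _ hperm hmlt
      rw [hbd2]
      have hlen3 : ((pvTrim (G.map pvBrk)).map (fun b => b.2)).length = 3 := by
        rw [List.length_map, pvTrim_length _ (by simp [hGdef])]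
      obtain ⟨c0, c1, c2, hc⟩ := List.length_eq_three.mp hlen3
      rw [pvCols_eq, List.nil_append, hc]
      exact assembleA c0 c1 c2 w
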